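-- pv_equiv track=rewrite | github.com/jayyeong/Algorithm | memomo.py | one_check
-- ===== SOURCE A (Python) =====
-- def one_check(arr):
--     minuslist = []
--     straight = True
--
--     for a in arr:
--         if a < 0:
--             minuslist.append(a)
--
--     if len(minuslist) == 1:
--         return True
--
--
--     for i in range(1,len(minuslist)):
--         if minuslist[i] - minuslist[i - 1] != 1:
--             straight = False
--
--     if straight:
--         return True
--     return False
-- ===== SOURCE B (Python) =====
-- def one_check(arr):
--     prev = None
--     straight = True
--     for a in arr:
--         if a < 0:
--             if prev is not None and a - prev != 1:
--                 straight = False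
--             prev = a
--     return straight
-- ===== Notes on version B (the rewrite author's own statement) =====
-- stated objective: simpler
-- what changed: Single pass over arr keeping only the last negative seen and a boolean, instead of building a list of negatives and then re-scanning it by index with range().
import Mathlib
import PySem

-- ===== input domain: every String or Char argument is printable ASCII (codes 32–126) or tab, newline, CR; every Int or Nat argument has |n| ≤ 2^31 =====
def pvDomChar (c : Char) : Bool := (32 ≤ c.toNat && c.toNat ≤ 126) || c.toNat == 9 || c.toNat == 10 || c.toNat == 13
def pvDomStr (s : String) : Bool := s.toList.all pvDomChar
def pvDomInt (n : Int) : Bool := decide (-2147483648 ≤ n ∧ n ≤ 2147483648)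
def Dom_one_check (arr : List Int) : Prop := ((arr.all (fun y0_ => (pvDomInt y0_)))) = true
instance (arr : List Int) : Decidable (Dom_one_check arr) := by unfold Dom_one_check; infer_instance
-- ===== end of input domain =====

-- B replaces A's build-a-list-of-negatives-then-rescan-by-index with a single O(1)-space pass
-- keeping only the last negative seen (objective: simpler).

-- ===== PORT A =====
-- Indices fed to minuslist come from range(1, len(minuslist)), hence always in range:
-- pyGetD with default 0 is exact here.
def astep (minuslist : List Int) (s : Bool) (i : Int) : Bool :=
  if PySem.List.pyGetD minuslist i 0 - PySem.List.pyGetD minuslist (i - 1) 0 ≠ 1 then false else s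

def one_check (arr : List Int) : Bool :=
  let minuslist := arr.foldl (fun acc a => if a < 0 then acc ++ [a] else acc) []
  if minuslist.length == 1 then true
  else
    let straight := (PySem.List.pyRange 1 (minuslist.length : Int) 1).foldl (astep minuslist) true
    if straight then true else false

-- ===== PORT B =====
-- state = (prev : last negative seen so far, straight)
def bstep (st : Option Int × Bool) (a : Int) : Option Int × Bool :=
  if a < 0 then
    (some a,
      match st.1 with
      | none => st.2
      | some p => if a - p ≠ 1 then false else st.2)
  else st

def one_check_alt (arr : List Int) : Bool :=
  (arr.foldl bstep ((none : Option Int), true)).2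

-- ===== PRECONDITION & SPEC =====
def Spec_one_check (arr : List Int) (out : Bool) : Prop := out = one_check_alt arr
instance (arr : List Int) (out : Bool) : Decidable (Spec_one_check arr out) := by unfold Spec_one_check; infer_instance

-- ===== CLAIM (what is proved, stated in full; the proofs are below) =====
def Claim_equal_one_check : Prop := ∀ (arr : List Int), Dom_one_check arr → Spec_one_check arr (one_check arr)

-- ===== LEMMAS AND PROOFS =====

-- the common characterisation: consecutive elements differ by exactly 1
def chk : List Int → Bool
  | x :: y :: r => (decide (y - x = 1)) && chk (y :: r)
  | _ => true

-- A's flag loop: 'if bad then straight = False' is a conjunction over the index list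
theorem foldl_flag (m : List Int) (l : List Int) (s : Bool) :
    l.foldl (astep m) s
      = (s && l.all (fun i => decide (PySem.List.pyGetD m i 0 - PySem.List.pyGetD m (i - 1) 0 = 1))) := by
  induction l generalizing s with
  | nil => simp
  | cons x t ih =>
    simp only [List.foldl_cons, List.all_cons, ih, astep]
    by_cases h : PySem.List.pyGetD m x 0 - PySem.List.pyGetD m (x - 1) 0 = 1 <;> simp [h]

-- index scan over range(1, len m) computes chk m (Nat-index form)
theorem all_range_chk (m : List Int) :
    (List.range (m.length - 1)).all
      (fun k => decide (m.getD (k + 1) 0 - m.getD k 0 = 1)) = chk m := by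
  induction m with
  | nil => simp [chk]
  | cons x t ih =>
    cases t with
    | nil => simp [chk]
    | cons y r =>
      have hlen : (x :: y :: r).length - 1 = r.length + 1 := by simp
      rw [hlen, List.range_succ_eq_map]
      simp only [List.all_cons, List.all_map]
      have htail : (List.range r.length).all
          (fun k => decide ((x :: y :: r).getD (k.succ + 1) 0 - (x :: y :: r).getD k.succ 0 = 1))
          = chk (y :: r) := by
        have h2 : (y :: r).length - 1 = r.length := by simp
        rw [← ih, h2]
        simp
      rw [show (fun k => decide ((x :: y :: r).getD (k + 1) 0 - (x :: y :: r).getD k 0 = 1)) ∘ Nat.succ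
            = fun k => decide ((x :: y :: r).getD (k.succ + 1) 0 - (x :: y :: r).getD k.succ 0 = 1)
          from rfl]
      rw [htail]
      simp [chk]

-- B's fold ignores non-negative elements
theorem bfold_filter (arr : List Int) (st : Option Int × Bool) :
    arr.foldl bstep st = (arr.filter (fun a => decide (a < 0))).foldl bstep st := by
  induction arr generalizing st with
  | nil => rfl
  | cons a t ih =>
    by_cases h : a < 0
    · simp [h, List.foldl_cons, ih]
    · have : bstep st a = st := by simp [bstep, h]
      simp [h, List.foldl_cons, this, ih]

-- B's scan from a seen negative p computes chk (p :: m)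
theorem bfold_chk (m : List Int) (p : Int) (s : Bool) (hm : ∀ x ∈ m, x < 0) :
    (m.foldl bstep (some p, s)).2 = (s && chk (p :: m)) := by
  induction m generalizing p s with
  | nil => simp [chk]
  | cons y t ih =>
    have hy : y < 0 := hm y (by simp)
    have hstep : bstep (some p, s) y = (some y, if y - p ≠ 1 then false else s) := by
      simp [bstep, hy]
    rw [List.foldl_cons, hstep, ih y _ (fun x hx => hm x (by simp [hx]))]
    by_cases h : y - p = 1 <;> simp [chk, h]

theorem bfold_chk_none (m : List Int) (hm : ∀ x ∈ m, x < 0) :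
    (m.foldl bstep ((none : Option Int), true)).2 = chk m := by
  cases m with
  | nil => rfl
  | cons x t =>
    have hx : x < 0 := hm x (by simp)
    have hstep : bstep ((none : Option Int), true) x = (some x, true) := by simp [bstep, hx]
    rw [List.foldl_cons, hstep, bfold_chk t x true (fun y hy => hm y (by simp [hy]))]
    simp

theorem one_check_eq_chk (arr : List Int) :
    one_check arr = chk (arr.filter (fun a => decide (a < 0))) := by
  unfold one_check
  rw [PySem.List.foldl_append_ite_eq_filter]
  simp only [List.nil_append]
  set F := arr.filter (fun a => decide (a < 0)) with hF
  by_cases h1 : F.length = 1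
  · obtain ⟨x, hx⟩ : ∃ x, F = [x] := List.length_eq_one_iff.mp h1
    simp [hx, chk]
  · simp only [beq_iff_eq, h1, if_false]
    simp only [foldl_flag]
    have hr : (PySem.List.pyRange 1 (F.length : Int) 1).all
        (fun i => decide (PySem.List.pyGetD F i 0 - PySem.List.pyGetD F (i - 1) 0 = 1)) = chk F := by
      rw [PySem.List.pyRange_one, List.all_map]
      have hn : ((F.length : Int) - 1).toNat = F.length - 1 := by omega
      rw [hn, ← all_range_chk F]
      congr 1
      funext k
      have h1 : PySem.List.pyGetD F ((1 : Int) + (k : Int)) 0 = F.getD (k + 1) 0 := by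
        rw [show ((1 : Int) + (k : Int)) = ((k + 1 : Nat) : Int) by push_cast; ring]
        exact PySem.List.pyGetD_natCast F (k + 1) 0
      simp [h1]
    rw [hr]
    cases chk F <;> simp

theorem one_check_alt_eq_chk (arr : List Int) :
    one_check_alt arr = chk (arr.filter (fun a => decide (a < 0))) := by
  unfold one_check_alt
  rw [bfold_filter]
  exact bfold_chk_none _ (fun x hx => by
    have := List.of_mem_filter hx
    simpa using this)

-- ===== VERDICT (by name: the statement is the Claim_ definition above) =====
theorem one_check_spec : Claim_equal_one_check := by
  intro arr _
  unfold Spec_one_check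
  rw [one_check_eq_chk, one_check_alt_eq_chk]
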